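-- pv_equiv track=rewrite | github.com/johnny22/breeze_directory_printer | run.py | list_modifier
-- ===== SOURCE A (Python) =====
-- def list_modifier(in_list):
--     """No Calls"""
--     out_list = []
--     while len(in_list)%12 != 0:
--         in_list.append(None)
--
--     while in_list != []:
--         out_list.append(in_list[-3:])
--         in_list = in_list[:-3]
--         out_list.append(in_list[:3])
--         in_list = in_list[3:]
--         out_list.append(in_list[:3])
--         in_list = in_list[3:]
--         out_list.append(in_list[-3:])
--         in_list = in_list[:-3]
--
--     final_out = [inner for outer in out_list for inner in outer]
--     return final_out
-- ===== SOURCE B (Python) =====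
-- def list_modifier(in_list):
--     # Same in-place padding as A (caller-visible mutation preserved).
--     while len(in_list) % 12 != 0:
--         in_list.append(None)
--     # Single index-driven pass: take each 12-element "layer" from both ends
--     # of the fixed list instead of repeatedly re-slicing a shrinking copy.
--     n = len(in_list)
--     out = []
--     for lo in range(0, n // 2, 6):
--         hi = n - lo
--         out += in_list[hi-3:hi] + in_list[lo:lo+3] + in_list[lo+3:lo+6] + in_list[hi-6:hi-3]
--     return out
-- ===== Notes on version B (the rewrite author's own statement) =====
-- stated objective: faster
-- what changed: Replaces A's loop that repeatedly re-slices and rebinds a shrinking copy of the list (plus a chunk list flattened at the end) with a single index-driven pass over the fixed padded list, appending each 12-element layer taken from both ends via lo/hi offsets.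
import Mathlib
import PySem

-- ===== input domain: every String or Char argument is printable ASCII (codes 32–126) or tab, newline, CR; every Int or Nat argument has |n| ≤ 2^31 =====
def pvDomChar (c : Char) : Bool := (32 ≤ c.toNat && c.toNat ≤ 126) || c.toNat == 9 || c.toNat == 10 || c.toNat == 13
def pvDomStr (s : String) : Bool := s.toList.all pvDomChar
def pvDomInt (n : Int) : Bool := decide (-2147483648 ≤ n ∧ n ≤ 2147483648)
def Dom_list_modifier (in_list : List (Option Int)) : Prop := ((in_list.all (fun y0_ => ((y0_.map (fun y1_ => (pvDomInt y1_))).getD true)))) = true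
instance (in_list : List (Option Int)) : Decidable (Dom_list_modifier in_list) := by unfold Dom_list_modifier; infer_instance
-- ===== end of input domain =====

-- B replaces A's repeated re-slicing of a shrinking list copy with one index-driven pass
-- over the fixed padded list (objective: faster). Both Pythons pad in_list in place
-- identically; the equivalence proved here is about the return value.


-- ===== PORT A =====
-- shared helper: Python's `while len(in_list)%12 != 0: in_list.append(None)` (the identical line
-- opens A and B). The Nat argument is FUEL that only makes the loop total: the loop body runs at
-- most 11 times (it stops as soon as the length is a multiple of 12), so fuel 12 never runs out.
def padLoopAux : Nat → List (Option Int) → List (Option Int)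
  | 0, l => l
  | fuel + 1, l => if l.length % 12 ≠ 0 then padLoopAux fuel (l ++ [none]) else l

def padLoop (l : List (Option Int)) : List (Option Int) := padLoopAux 12 l

-- A's `while in_list != []` loop: out_list accumulates chunks, in_list shrinks by re-slicing.
-- The Nat argument is FUEL that only makes the loop total: every iteration strictly shortens
-- in_list, so starting the fuel at in_list's length never runs out.
def chunkLoopAux : Nat → List (Option Int) → List (List (Option Int)) → List (List (Option Int))
  | 0, _, out => out
  | fuel + 1, l, out =>
    if l = [] then out else
      let c1 := PySem.List.slice l (some (-3)) none          -- in_list[-3:]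
      let l1 := PySem.List.slice l none (some (-3))          -- in_list[:-3]
      let c2 := PySem.List.slice l1 none (some 3)            -- in_list[:3]
      let l2 := PySem.List.slice l1 (some 3) none            -- in_list[3:]
      let c3 := PySem.List.slice l2 none (some 3)            -- in_list[:3]
      let l3 := PySem.List.slice l2 (some 3) none            -- in_list[3:]
      let c4 := PySem.List.slice l3 (some (-3)) none         -- in_list[-3:]
      let l4 := PySem.List.slice l3 none (some (-3))         -- in_list[:-3]
      chunkLoopAux fuel l4 (out ++ [c1] ++ [c2] ++ [c3] ++ [c4])

def list_modifier (in_list : List (Option Int)) : List (Option Int) :=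
  -- `final_out = [inner for outer in out_list for inner in outer]`
  (chunkLoopAux (padLoop in_list).length (padLoop in_list) []).flatMap (fun inner => inner)

-- ===== PORT B =====
-- body of B's `for lo in range(0, n // 2, 6)` loop over the FIXED padded list
def altBody (padded : List (Option Int)) (out : List (Option Int)) (lo : Int) : List (Option Int) :=
  let n : Int := padded.length
  let hi := n - lo
  out ++ PySem.List.slice padded (some (hi - 3)) (some hi)       -- in_list[hi-3:hi]
      ++ PySem.List.slice padded (some lo) (some (lo + 3))       -- in_list[lo:lo+3]
      ++ PySem.List.slice padded (some (lo + 3)) (some (lo + 6)) -- in_list[lo+3:lo+6]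
      ++ PySem.List.slice padded (some (hi - 6)) (some (hi - 3)) -- in_list[hi-6:hi-3]

def list_modifier_alt (in_list : List (Option Int)) : List (Option Int) :=
  let padded := padLoop in_list
  let n : Int := padded.length
  (PySem.List.pyRange 0 (PySem.Int.floordiv n 2) 6).foldl (altBody padded) []

-- ===== PRECONDITION & SPEC =====
def Spec_list_modifier (in_list : List (Option Int)) (out : List (Option Int)) : Prop := out = list_modifier_alt in_list
instance (in_list : List (Option Int)) (out : List (Option Int)) : Decidable (Spec_list_modifier in_list out) := by unfold Spec_list_modifier; infer_instance

-- ===== CLAIM (what is proved, stated in full; the proofs are below) =====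
def Claim_equal_list_modifier : Prop := ∀ (in_list : List (Option Int)), Dom_list_modifier in_list → Spec_list_modifier in_list (list_modifier in_list)

-- ===== LEMMAS AND PROOFS =====

theorem pad_aux : ∀ (fuel : Nat) (l : List (Option Int)), (12 - l.length % 12) % 12 ≤ fuel →
    (padLoopAux fuel l).length % 12 = 0 := by
  intro fuel
  induction fuel with
  | zero => intro l h; simp only [padLoopAux]; omega
  | succ fuel ih =>
    intro l h
    by_cases hm : l.length % 12 ≠ 0
    · simp only [padLoopAux]
      rw [if_pos hm]
      exact ih _ (by simp only [List.length_append, List.length_cons, List.length_nil]; omega)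
    · simp only [padLoopAux]
      rw [if_neg hm]
      omega

theorem pad_mod (l : List (Option Int)) : (padLoop l).length % 12 = 0 :=
  pad_aux 12 l (by omega)

theorem chunk_nil (f : Nat) (out : List (List (Option Int))) : chunkLoopAux f [] out = out := by
  cases f <;> simp [chunkLoopAux]

-- one iteration of A's loop strictly shortens the list
theorem chunk_dec (l : List (Option Int)) (h : l ≠ []) :
    (PySem.List.slice (PySem.List.slice (PySem.List.slice (PySem.List.slice l none (some (-3))) (some 3) none) (some 3) none) none (some (-3))).length < l.length := by
  have h0 : 0 < l.length := List.length_pos_of_ne_nil h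
  simp [PySem.List.slice_to_neg_ofNat _ 3 (by norm_num), PySem.List.slice_from]
  omega

-- one unfolding of A's loop on a list decomposed as 3 + 3 + middle + 3 + 3
theorem chunk_unfold (f : Nat) (x1 x2 mid y1 y2 : List (Option Int)) (out : List (List (Option Int)))
    (h1 : x1.length = 3) (h2 : x2.length = 3) (h3 : y1.length = 3) (h4 : y2.length = 3) :
    chunkLoopAux (f + 1) (x1 ++ x2 ++ mid ++ y1 ++ y2) out
      = chunkLoopAux f mid (out ++ [y2] ++ [x1] ++ [x2] ++ [y1]) := by
  have hne : x1 ++ x2 ++ mid ++ y1 ++ y2 ≠ [] := by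
    intro h; have := congrArg List.length h; simp [h1] at this
  have e1 : PySem.List.slice (x1 ++ x2 ++ mid ++ y1 ++ y2) (some (-3)) none = y2 := by
    rw [PySem.List.slice_from_neg_ofNat _ 3 (by norm_num)]
    exact List.drop_left' (by simp [h1, h2, h3, h4]; try omega)
  have e2 : PySem.List.slice (x1 ++ x2 ++ mid ++ y1 ++ y2) none (some (-3)) = x1 ++ x2 ++ mid ++ y1 := by
    rw [PySem.List.slice_to_neg_ofNat _ 3 (by norm_num)]
    exact List.take_left' (by simp [h1, h2, h3, h4]; try omega)
  have e3 : PySem.List.slice (x1 ++ x2 ++ mid ++ y1) none (some 3) = x1 := by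
    rw [PySem.List.slice_to _ (by norm_num : (0:Int) ≤ 3)]
    rw [List.append_assoc x1, List.append_assoc x1]
    exact List.take_left' (by simp [h1]; try omega)
  have e4 : PySem.List.slice (x1 ++ x2 ++ mid ++ y1) (some 3) none = x2 ++ mid ++ y1 := by
    rw [PySem.List.slice_from _ (by norm_num : (0:Int) ≤ 3)]
    rw [List.append_assoc x1, List.append_assoc x1, List.drop_left' (by simp [h1]; try omega)]
  have e5 : PySem.List.slice (x2 ++ mid ++ y1) none (some 3) = x2 := by
    rw [PySem.List.slice_to _ (by norm_num : (0:Int) ≤ 3)]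
    rw [List.append_assoc x2]
    exact List.take_left' (by simp [h2]; try omega)
  have e6 : PySem.List.slice (x2 ++ mid ++ y1) (some 3) none = mid ++ y1 := by
    rw [PySem.List.slice_from _ (by norm_num : (0:Int) ≤ 3)]
    rw [List.append_assoc x2, List.drop_left' (by simp [h2]; try omega)]
  have e7 : PySem.List.slice (mid ++ y1) (some (-3)) none = y1 := by
    rw [PySem.List.slice_from_neg_ofNat _ 3 (by norm_num)]
    exact List.drop_left' (by simp [h3]; try omega)
  have e8 : PySem.List.slice (mid ++ y1) none (some (-3)) = mid := by
    rw [PySem.List.slice_to_neg_ofNat _ 3 (by norm_num)]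
    exact List.take_left' (by simp [h3]; try omega)
  simp only [chunkLoopAux]
  rw [if_neg hne]
  simp only [e1, e2, e3, e4, e5, e6, e7, e8]

theorem chunk_acc : ∀ (f : Nat) (l : List (Option Int)) (out : List (List (Option Int))),
    chunkLoopAux f l out = out ++ chunkLoopAux f l [] := by
  intro f
  induction f with
  | zero => intro l out; simp [chunkLoopAux]
  | succ f ih =>
    intro l out
    by_cases h : l = []
    · subst h; simp [chunk_nil]
    · simp only [chunkLoopAux]
      rw [if_neg h, if_neg h]
      rw [ih, ih _ ([] ++ _ ++ _ ++ _ ++ _)]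
      simp [List.append_assoc]

-- any fuel at least the list's length computes the same result
theorem chunk_fuel : ∀ (n : Nat) (l : List (Option Int)), l.length ≤ n →
    ∀ (f : Nat) (out : List (List (Option Int))), l.length ≤ f →
    chunkLoopAux f l out = chunkLoopAux l.length l out := by
  intro n
  induction n with
  | zero =>
    intro l hl f out _
    have hl0 : l = [] := by cases l <;> simp_all
    subst hl0
    simp [chunk_nil]
  | succ n ih =>
    intro l hl f out hf
    by_cases h : l = []
    · subst h; simp [chunk_nil]
    · have h0 : 0 < l.length := List.length_pos_of_ne_nil h
      have hlen := chunk_dec l h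
      obtain ⟨f', rfl⟩ : ∃ f', f = f' + 1 := ⟨f - 1, by omega⟩
      obtain ⟨L, hL⟩ : ∃ L, l.length = L + 1 := ⟨l.length - 1, by omega⟩
      rw [hL]
      simp only [chunkLoopAux]
      rw [if_neg h, if_neg h]
      rw [ih _ (by omega) f' _ (by omega), ih _ (by omega) L _ (by omega)]

-- one layer of A's loop, flattened
theorem chunk_step (x1 x2 mid y1 y2 : List (Option Int))
    (h1 : x1.length = 3) (h2 : x2.length = 3) (h3 : y1.length = 3) (h4 : y2.length = 3) :
    (chunkLoopAux (x1 ++ x2 ++ mid ++ y1 ++ y2).length (x1 ++ x2 ++ mid ++ y1 ++ y2) []).flatMap (fun inner => inner)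
      = y2 ++ x1 ++ x2 ++ y1 ++ (chunkLoopAux mid.length mid []).flatMap (fun inner => inner) := by
  have hL : (x1 ++ x2 ++ mid ++ y1 ++ y2).length = (mid.length + 11) + 1 := by
    simp [h1, h2, h3, h4]; omega
  rw [hL, chunk_unfold _ _ _ _ _ _ _ h1 h2 h3 h4,
    chunk_fuel (mid.length + 11) mid (by omega) (mid.length + 11) _ (by omega),
    chunk_acc mid.length mid]
  simp [List.append_assoc]

-- a nonnegative-bound slice picks out exactly the named segment
theorem slice_at (L pre seg suf : List (Option Int)) (a b : Int)
    (hL : L = pre ++ (seg ++ suf)) (ha : a = (pre.length : Int)) (hb : b = (pre.length : Int) + seg.length) :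
    PySem.List.slice L (some a) (some b) = seg := by
  subst hL ha hb
  rw [PySem.List.slice_toNat _ (by positivity) (by positivity)]
  have h1 : ((pre.length : Int) + (seg.length : Int)).toNat = pre.length + seg.length := by omega
  have h2 : ((pre.length : Int)).toNat = pre.length := by omega
  rw [h1, h2, List.drop_left' rfl]
  have h3 : pre.length + seg.length - pre.length = seg.length := by omega
  rw [h3, List.take_left' rfl]

theorem pyRange6_cons (a : Int) (m : Nat) :
    PySem.List.pyRange a (a + 6 * ((m : Int) + 1)) 6 = a :: PySem.List.pyRange (a + 6) (a + 6 * ((m : Int) + 1)) 6 := by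
  rw [PySem.List.pyRange_of_pos _ _ (by norm_num), PySem.List.pyRange_of_pos _ _ (by norm_num)]
  have hlt : a < a + 6 * ((m : Int) + 1) := by omega
  rw [if_pos hlt]
  have c1 : ((a + 6 * ((m : Int) + 1) - a + 6 - 1) / 6).toNat = m + 1 := by omega
  rw [c1]
  rcases Nat.eq_zero_or_pos m with hm | hm
  · subst hm
    have hn : ¬ (a + 6 < a + 6 * ((0 : Int) + 1)) := by omega
    simp [hn]
  · have hlt2 : a + 6 < a + 6 * ((m : Int) + 1) := by omega
    rw [if_pos hlt2]
    have c2 : ((a + 6 * ((m : Int) + 1) - (a + 6) + 6 - 1) / 6).toNat = m := by omega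
    rw [c2, List.range_succ_eq_map, List.map_cons, List.map_map]
    simp only [Nat.cast_zero, mul_zero, add_zero]
    congr 1
    apply List.map_congr_left
    intro k _
    simp [Function.comp]
    ring

theorem main_loop : ∀ (m : Nat) (lo : Nat) (full pre l post acc : List (Option Int)),
    full = pre ++ l ++ post → pre.length = lo → post.length = lo → l.length = 12 * m →
    (PySem.List.pyRange (lo : Int) ((lo : Int) + 6 * ((m : Nat) : Int)) 6).foldl (altBody full) acc
      = acc ++ (chunkLoopAux l.length l []).flatMap (fun inner => inner) := by
  intro m
  induction m with
  | zero =>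
    intro lo full pre l post acc hf hp hq hl
    have hl0 : l = [] := List.eq_nil_of_length_eq_zero (by omega)
    subst hl0
    have h0 : (lo : Int) + 6 * ((0 : Nat) : Int) = (lo : Int) := by push_cast; ring
    rw [h0, PySem.List.pyRange_of_pos _ _ (by norm_num)]
    simp [chunk_nil]
  | succ m ih =>
    intro lo full pre l post acc hf hp hq hl
    -- decompose l into 3 + 3 + (12m) + 3 + 3
    set x1 := l.take 3 with hx1d
    set r1 := l.drop 3 with hr1d
    set x2 := r1.take 3 with hx2d
    set r2 := r1.drop 3 with hr2d
    set mid := r2.take (12 * m) with hmidd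
    set r3 := r2.drop (12 * m) with hr3d
    set y1 := r3.take 3 with hy1d
    set y2 := r3.drop 3 with hy2d
    have hchain : l = x1 ++ (x2 ++ (mid ++ (y1 ++ y2))) := by
      rw [hy1d, hy2d, List.take_append_drop, hmidd, hr3d, List.take_append_drop,
        hx2d, hr2d, List.take_append_drop, hx1d, hr1d, List.take_append_drop]
    have hx1 : x1.length = 3 := by simp [hx1d]; omega
    have hr1 : r1.length = 12 * m + 9 := by simp [hr1d]; omega
    have hx2 : x2.length = 3 := by simp [hx2d]; omega
    have hr2 : r2.length = 12 * m + 6 := by simp [hr2d]; omega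
    have hmid : mid.length = 12 * m := by simp [hmidd]; omega
    have hr3 : r3.length = 6 := by simp [hr3d]; omega
    have hy1 : y1.length = 3 := by simp [hy1d]; omega
    have hy2 : y2.length = 3 := by simp [hy2d]; omega
    have hfl : full.length = 12 * (m + 1) + 2 * lo := by
      subst hf; simp [hl, hp, hq]; omega
    -- peel the first index off the range
    have hcast : (lo : Int) + 6 * (((m + 1 : Nat)) : Int) = (lo : Int) + 6 * (((m : Nat) : Int) + 1) := by push_cast; ring
    rw [hcast, pyRange6_cons, List.foldl_cons]
    -- one application of the loop body picks out y2, x1, x2, y1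
    have hb : altBody full acc (lo : Int) = acc ++ y2 ++ x1 ++ x2 ++ y1 := by
      show acc ++ _ ++ _ ++ _ ++ _ = _
      rw [slice_at full (pre ++ x1 ++ x2 ++ mid ++ y1) y2 post _ _
            (by rw [hf, hchain]; simp [List.append_assoc])
            (by simp [hx1, hx2, hmid, hy1, hfl, hp]; try push_cast; try ring)
            (by simp [hx1, hx2, hmid, hy1, hy2, hfl, hp]; try push_cast; try ring),
          slice_at full pre x1 (x2 ++ mid ++ y1 ++ y2 ++ post) _ _
            (by rw [hf, hchain]; simp [List.append_assoc])
            (by rw [hp])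
            (by rw [hp, hx1]; try push_cast; try ring),
          slice_at full (pre ++ x1) x2 (mid ++ y1 ++ y2 ++ post) _ _
            (by rw [hf, hchain]; simp [List.append_assoc])
            (by simp [hx1, hp]; try push_cast; try ring)
            (by simp [hx1, hx2, hp]; try push_cast; try ring),
          slice_at full (pre ++ x1 ++ x2 ++ mid) y1 (y2 ++ post) _ _
            (by rw [hf, hchain]; simp [List.append_assoc])
            (by simp [hx1, hx2, hmid, hfl, hp]; try push_cast; try ring)
            (by simp [hx1, hx2, hmid, hy1, hfl, hp]; try push_cast; try ring)]
    rw [hb]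
    -- recursive call on the inner 12m elements
    have hcast2 : (lo : Int) + 6 = ((lo + 6 : Nat) : Int) := by push_cast; ring
    have hcast3 : (lo : Int) + 6 * (((m : Nat) : Int) + 1) = ((lo + 6 : Nat) : Int) + 6 * ((m : Nat) : Int) := by push_cast; ring
    rw [hcast2, hcast3, ih (lo + 6) full (pre ++ x1 ++ x2) mid (y1 ++ (y2 ++ post)) _
          (by rw [hf, hchain]; simp [List.append_assoc])
          (by simp [hx1, hx2, hp])
          (by simp [hy1, hy2, hq]; omega)
          hmid]
    -- reassemble
    rw [hchain, show x1 ++ (x2 ++ (mid ++ (y1 ++ y2))) = x1 ++ x2 ++ mid ++ y1 ++ y2 by simp [List.append_assoc]]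
    rw [chunk_step x1 x2 mid y1 y2 hx1 hx2 hy1 hy2]
    simp only [hmid, List.append_assoc]

-- ===== VERDICT (by name: the statement is the Claim_ definition above) =====
theorem list_modifier_spec : Claim_equal_list_modifier := by
  intro in_list _
  unfold Spec_list_modifier list_modifier list_modifier_alt
  have hm : (padLoop in_list).length % 12 = 0 := pad_mod in_list
  set p := padLoop in_list with hpw
  set M := p.length / 12 with hMw
  have hP : p.length = 12 * M := by omega
  have hdiv : PySem.Int.floordiv ((p.length : Int)) 2 = ((0 : Nat) : Int) + 6 * ((M : Nat) : Int) := by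
    rw [PySem.Int.floordiv_eq_ediv_of_pos (by norm_num : (0:Int) < 2)]
    rw [hP]; push_cast; omega
  simp only [hdiv]
  rw [show ((0 : Int)) = ((0 : Nat) : Int) by norm_num] at *
  rw [main_loop M 0 p [] p [] [] (by simp) rfl rfl hP]
  simp
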